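-- pv_equiv track=rewrite | github.com/AndreaStudy/PythonAlgo | programmers/디펜스게임/sol.py | solution
-- ===== SOURCE A (Python) =====
-- from heapq import heappop, heappush
--
-- def solution(n, k , enemy):
--   if k >= len(enemy):
--     return len(enemy)
--
--   answer = 0
--   num = 0
--   hq = []
--
--   for e in enemy:
--     heappush(hq, -e)
--     num += e
--     if num > n:
--       if not k:
--         break
--       k -= 1
--       num += heappop(hq)
--     answer += 1
--
--   return answer
-- ===== SOURCE B (Python) =====
-- def solution(n, k, enemy):
--     # Greedy without a heap: keep the surviving waves in a plain list, track
--     # remaining health, and when it drops below zero spend a shield on the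
--     # largest wave found by a linear scan.
--     if k >= len(enemy):
--         return len(enemy)
--     waves = []
--     hp = n
--     shields = 0
--     for count, e in enumerate(enemy):
--         waves.append(e)
--         hp -= e
--         if hp < 0:
--             if shields == k:
--                 return count
--             shields += 1
--             m = max(waves)
--             waves.remove(m)
--             hp += m
--     return len(enemy)
-- ===== Notes on version B (the rewrite author's own statement) =====
-- stated objective: simpler
-- what changed: B drops heapq entirely: instead of a negated min-heap and a shield countdown it keeps the surviving waves in a plain list, tracks remaining health downward, and when health goes negative finds the biggest wave by a linear max scan and removes it, counting shields up.
import Mathlib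
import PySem

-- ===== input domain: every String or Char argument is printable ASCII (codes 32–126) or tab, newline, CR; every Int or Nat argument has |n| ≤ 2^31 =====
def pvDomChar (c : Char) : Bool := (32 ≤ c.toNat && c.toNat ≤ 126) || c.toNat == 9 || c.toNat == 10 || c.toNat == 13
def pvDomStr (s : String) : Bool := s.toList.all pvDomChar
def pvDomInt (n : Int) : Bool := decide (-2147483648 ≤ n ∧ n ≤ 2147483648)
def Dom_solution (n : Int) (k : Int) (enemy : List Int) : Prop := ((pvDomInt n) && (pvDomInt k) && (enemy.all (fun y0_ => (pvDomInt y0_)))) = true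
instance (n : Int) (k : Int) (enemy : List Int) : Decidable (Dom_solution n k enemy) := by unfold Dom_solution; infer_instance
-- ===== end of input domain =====

-- B replaces A's negated min-heap and shield countdown by a plain list of waves,
-- a linear max scan at shield time and a remaining-health accumulator (objective: simpler).

-- ===== PORT A =====
-- heapq is modelled behaviourally: the heap is kept as an ascending sorted list,
-- heappush = ordered insert, heappop = take the head (= the minimum); the values
-- pushed and popped are exactly those of Python's heapq, so the port is exact.
def hpush (a : Int) : List Int → List Int
  | [] => [a]
  | x :: xs => if a ≤ x then a :: x :: xs else x :: hpush a xs

-- the for-loop of A; heappop = headI/tail: exact because hq1 was just pushed to, so it is nonempty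
def solutionLoop (n : Int) : Int → Int → Int → List Int → List Int → Int
  | _, answer, _, _, [] => answer
  | k, answer, num, hq, e :: rest =>
      let hq1 := hpush (-e) hq
      let num1 := num + e
      if num1 > n then
        if k = 0 then answer
        else solutionLoop n (k - 1) (answer + 1) (num1 + hq1.headI) hq1.tail rest
      else solutionLoop n k (answer + 1) num1 hq1 rest

def solution (n : Int) (k : Int) (enemy : List Int) : Int :=
  if k ≥ (enemy.length : Int) then (enemy.length : Int)
  else solutionLoop n k 0 0 [] enemy

-- ===== PORT B =====
-- the for-loop of Source B; returns some count on the early `return count`, none when the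
-- loop completes (the wrapper then returns len(enemy)).
-- max(waves1) / waves1.remove(m) use .getD: exact because waves1 was just appended to,
-- so it is nonempty and m ∈ waves1.
def altLoop (n : Int) (k : Int) : List Int → Int → Int → Int → List Int → Option Int
  | _, _, _, _, [] => none
  | waves, hp, shields, count, e :: rest =>
      let waves1 := waves ++ [e]
      let hp1 := hp - e
      if hp1 < 0 then
        if shields = k then some count
        else
          let m := (PySem.List.max? waves1 (fun x => x)).getD 0
          altLoop n k ((PySem.List.remove? waves1 m).getD []) (hp1 + m) (shields + 1) (count + 1) rest
      else altLoop n k waves1 hp1 shields (count + 1) rest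

def solution_alt (n : Int) (k : Int) (enemy : List Int) : Int :=
  if k ≥ (enemy.length : Int) then (enemy.length : Int)
  else (altLoop n k [] n 0 0 enemy).getD (enemy.length : Int)

-- ===== PRECONDITION & SPEC =====
def Spec_solution (n : Int) (k : Int) (enemy : List Int) (out : Int) : Prop := out = solution_alt n k enemy
instance (n : Int) (k : Int) (enemy : List Int) (out : Int) : Decidable (Spec_solution n k enemy out) := by unfold Spec_solution; infer_instance

-- ===== CLAIM (what is proved, stated in full; the proofs are below) =====
def Claim_equal_solution : Prop := ∀ (n : Int) (k : Int) (enemy : List Int), Dom_solution n k enemy → Spec_solution n k enemy (solution n k enemy)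

-- ===== LEMMAS AND PROOFS =====

theorem hpush_perm (a : Int) (l : List Int) : (hpush a l).Perm (a :: l) := by
  induction l with
  | nil => simp [hpush]
  | cons x xs ih =>
      simp only [hpush]
      split
      · exact List.Perm.refl _
      · exact (List.Perm.cons x ih).trans (List.Perm.swap a x xs)

theorem hpush_pairwise (a : Int) (l : List Int) (h : l.Pairwise (· ≤ ·)) :
    (hpush a l).Pairwise (· ≤ ·) := by
  induction l with
  | nil => simp [hpush]
  | cons x xs ih =>
      obtain ⟨hx, hxs⟩ := List.pairwise_cons.mp h
      simp only [hpush]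
      split
      · next hax =>
          refine List.pairwise_cons.mpr ⟨?_, h⟩
          intro b hb
          rcases List.mem_cons.mp hb with rfl | hb'
          · exact hax
          · exact le_trans hax (hx _ hb')
      · next hax =>
          refine List.pairwise_cons.mpr ⟨?_, ih hxs⟩
          intro b hb
          rcases List.mem_cons.mp ((hpush_perm a xs).mem_iff.mp hb) with rfl | hb'
          · omega
          · exact hx _ hb'

-- the coupled-loop invariant: A's heap is (a permutation of) B's negated wave list,
-- A's num and B's hp are complements, A's shield countdown matches B's shield count-up.
theorem loop_eq (n k0 : Int) :
    ∀ (rest : List Int) (s answer num : Int) (hq waves : List Int),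
      hq.Pairwise (· ≤ ·) → hq.Perm (waves.map (fun x => -x)) →
      solutionLoop n (k0 - s) answer num hq rest
        = (altLoop n k0 waves (n - num) s answer rest).getD (answer + rest.length) := by
  intro rest
  induction rest with
  | nil => intro s answer num hq waves _ _; simp [solutionLoop, altLoop]
  | cons e rest ih =>
      intro s answer num hq waves hsort hperm
      simp only [solutionLoop, altLoop]
      have hperm1 : (hpush (-e) hq).Perm (((waves ++ [e]).map (fun x => -x))) := by
        refine (hpush_perm (-e) hq).trans ?_
        have h1 : ((waves ++ [e]).map (fun x => -x)) = waves.map (fun x => -x) ++ [-e] := by simp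
        rw [h1]
        exact (hperm.cons (-e)).trans (List.perm_append_singleton (-e) _).symm
      have hsort1 : (hpush (-e) hq).Pairwise (· ≤ ·) := hpush_pairwise _ _ hsort
      have hcond : (num + e > n) ↔ (n - num - e < 0) := by omega
      by_cases hgt : num + e > n
      · rw [if_pos hgt, if_pos (hcond.mp hgt)]
        by_cases hk : s = k0
        · rw [if_pos (by omega : k0 - s = 0), if_pos hk]
          simp
        · rw [if_neg (by omega : ¬ k0 - s = 0), if_neg hk]
          have hne : waves ++ [e] ≠ [] := by simp
          obtain ⟨m, hm⟩ : ∃ m, PySem.List.max? (waves ++ [e]) (fun x => x) = some m := by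
            rcases h : PySem.List.max? (waves ++ [e]) (fun x => x) with _ | m
            · exact absurd ((PySem.List.max?_eq_none_iff _ _).mp h) hne
            · exact ⟨m, rfl⟩
          have hmmem : m ∈ waves ++ [e] := PySem.List.max?_mem hm
          have hmmax : ∀ y ∈ waves ++ [e], y ≤ m := fun y hy => PySem.List.max?_isMax hm y hy
          obtain ⟨h0, t, hht⟩ : ∃ h0 t, hpush (-e) hq = h0 :: t := by
            cases hhq : hpush (-e) hq with
            | nil =>
                exfalso
                have hlen := hperm1.length_eq
                rw [hhq] at hlen; simp at hlen
            | cons h0 t => exact ⟨h0, t, rfl⟩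
          have hmem_neg : (-m) ∈ hpush (-e) hq :=
            hperm1.mem_iff.mpr (List.mem_map.mpr ⟨m, hmmem, rfl⟩)
          have hhead : h0 = -m := by
            have hh0mem : h0 ∈ hpush (-e) hq := by rw [hht]; exact List.mem_cons_self
            obtain ⟨x, hx, hxe⟩ := List.mem_map.mp (hperm1.mem_iff.mp hh0mem)
            rw [hht] at hmem_neg
            rcases List.mem_cons.mp hmem_neg with heq | hmt
            · omega
            · have h2 : h0 ≤ -m := by
                rw [hht] at hsort1
                exact (List.pairwise_cons.mp hsort1).1 _ hmt
              have h1 : -m ≤ -x := by have := hmmax x hx; omega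
              omega
          have hrem : PySem.List.remove? (waves ++ [e]) m = some ((waves ++ [e]).erase m) :=
            PySem.List.remove?_eq_some_erase _ m hmmem
          have htail : t.Perm ((((waves ++ [e]).erase m).map (fun x => -x))) := by
            have hinj : Function.Injective (fun x : Int => -x) := fun a b h => by
              simpa using congrArg Neg.neg h
            rw [List.map_erase hinj]
            have hperase := hperm1.erase h0
            rw [hht, List.erase_cons_head] at hperase
            rw [show ((-m : Int)) = h0 from hhead.symm]
            exact hperase
          have htsort : t.Pairwise (· ≤ ·) := by
            rw [hht] at hsort1; exact (List.pairwise_cons.mp hsort1).2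
          have hrec := ih (s + 1) (answer + 1) (num + e + -m) t ((waves ++ [e]).erase m) htsort htail
          rw [hht]
          simp only [List.headI, List.tail, hm, Option.getD_some, hrem]
          rw [hhead]
          rw [show k0 - s - 1 = k0 - (s + 1) from by omega]
          rw [show n - num - e + m = n - (num + e + -m) from by omega]
          rw [hrec]
          congr 1
          simp only [List.length_cons]
          push_cast
          ring
      · rw [if_neg hgt, if_neg (fun h => hgt (hcond.mpr h))]
        have hrec := ih s (answer + 1) (num + e) (hpush (-e) hq) (waves ++ [e]) hsort1 hperm1
        rw [show n - num - e = n - (num + e) from by omega]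
        rw [hrec]
        congr 1
        simp only [List.length_cons]
        push_cast
        ring

-- ===== VERDICT (by name: the statement is the Claim_ definition above) =====
theorem solution_spec : Claim_equal_solution := by
  intro n k enemy _
  unfold Spec_solution solution solution_alt
  by_cases hk : k ≥ (enemy.length : Int)
  · rw [if_pos hk, if_pos hk]
  · rw [if_neg hk, if_neg hk]
    have h := loop_eq n k enemy 0 0 0 [] [] (by simp) (by simp)
    simpa using h
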